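-- pv_equiv track=rewrite | github.com/tjsdud594/Algorithm | test/question1_4.py | solution
-- ===== SOURCE A (Python) =====
-- def solution(price, cost):
--     # 배송비를 제외한 실제 판매가격을 구한다.
--     real_price = []
--     for i in range(len(price)):
--         p = price[i] - cost[i]
--         if p > 0:
--             real_price.append(p)
--     if len(real_price) == 0:
--         return 0
--
--     # 각 고객별로 지불가능금액을 뽑아서 전체 고객과 비교
--     money = []
--     for pri1 in range(len(price)):
--         count = 0
--         for pri2 in price:
--             # 한 고객과 전체 고객 비교해서 같거나 크면 count에 +1
--             if price[pri1] <= pri2: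
--                 count += 1
--                 final = count*(price[pri1]-cost[pri1])
--         money.append(final)
--     return price[money.index(max(money))]
-- ===== SOURCE B (Python) =====
-- def solution(price, cost):
--     n = len(price)
--     profits = [price[i] - cost[i] for i in range(n)]
--     if not any(p > 0 for p in profits):
--         return 0
--     sp = sorted(price)
--     cnt = {}
--     for i, v in enumerate(sp):
--         if v not in cnt:
--             cnt[v] = n - i
--     money = [cnt[price[i]] * profits[i] for i in range(n)]
--     best_i = 0
--     for i in range(1, n):
--         if money[i] > money[best_i]:
--             best_i = i
--     return price[best_i]
-- ===== Notes on version B (the rewrite author's own statement) =====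
-- stated objective: faster
-- what changed: Replaces A's O(n^2) nested per-customer counting with one sort of the prices plus a first-occurrence dictionary mapping each price to the count of prices >= it (n minus its first index in the sorted list), followed by a single linear argmax scan instead of money.index(max(money)).
import Mathlib
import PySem

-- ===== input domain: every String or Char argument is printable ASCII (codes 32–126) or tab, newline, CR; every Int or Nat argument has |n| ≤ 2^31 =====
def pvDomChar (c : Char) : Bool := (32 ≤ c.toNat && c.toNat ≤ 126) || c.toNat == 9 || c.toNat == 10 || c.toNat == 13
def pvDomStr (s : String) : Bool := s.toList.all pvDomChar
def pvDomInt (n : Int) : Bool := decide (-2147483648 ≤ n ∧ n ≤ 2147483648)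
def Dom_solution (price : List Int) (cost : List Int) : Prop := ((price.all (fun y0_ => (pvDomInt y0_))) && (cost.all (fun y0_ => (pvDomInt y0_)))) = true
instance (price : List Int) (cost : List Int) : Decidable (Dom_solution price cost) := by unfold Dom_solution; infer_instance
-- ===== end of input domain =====

-- B replaces A's quadratic per-customer counting with sort + a first-occurrence count dictionary
-- and a single argmax scan (objective: faster, O(n log n) vs O(n^2)).

-- ===== PORT A =====
-- literal transliteration of Source A; the Python variable `final` is carried across outer
-- iterations, modelled by the Int component of the fold state (initial 0 is never read,
-- since each outer iteration matches price[pri1] against itself at least once).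
def solution (price : List Int) (cost : List Int) : Int :=
  let real_price : List Int := (List.range price.length).foldl (fun acc (i : Nat) =>
    let p := PySem.List.pyGetD price (i : Int) 0 - PySem.List.pyGetD cost (i : Int) 0
    if p > 0 then acc ++ [p] else acc) []
  if real_price.length = 0 then 0
  else
    let res := (List.range price.length).foldl (fun (s : List Int × Int) (pri1 : Nat) =>
      let st := price.foldl (fun (cf : Int × Int) pri2 =>
        if PySem.List.pyGetD price (pri1 : Int) 0 ≤ pri2 then
          (cf.1 + 1, (cf.1 + 1) * (PySem.List.pyGetD price (pri1 : Int) 0 - PySem.List.pyGetD cost (pri1 : Int) 0))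
        else cf) ((0 : Int), s.2)
      (s.1 ++ [st.2], st.2)) (([] : List Int), (0 : Int))
    let money := res.1
    PySem.List.pyGetD price
      (((PySem.List.index? money ((PySem.List.max? money (fun y => y)).getD 0)).getD 0 : Nat) : Int) 0

-- ===== PORT B =====
-- literal transliteration of Source B
def solution_alt (price : List Int) (cost : List Int) : Int :=
  let n := price.length
  let profits : List Int := (List.range n).map (fun (i : Nat) =>
    PySem.List.pyGetD price (i : Int) 0 - PySem.List.pyGetD cost (i : Int) 0)
  if !(profits.any (fun p => decide (p > 0))) then 0
  else
    let sp := PySem.List.sorted price (fun y => y) false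
    let cnt := (PySem.List.enumerate sp 0).foldl (fun (d : PySem.Dict Int Int) iv =>
      if d.contains iv.2 then d else d.insert iv.2 ((n : Int) - iv.1)) PySem.Dict.empty
    let money : List Int := (List.range n).map (fun (i : Nat) =>
      cnt.getD (PySem.List.pyGetD price (i : Int) 0) 0 * PySem.List.pyGetD profits (i : Int) 0)
    let best := (PySem.List.pyRange 1 (n : Int) 1).foldl (fun (bi : Int) i =>
      if PySem.List.pyGetD money i 0 > PySem.List.pyGetD money bi 0 then i else bi) 0
    PySem.List.pyGetD price best 0

-- ===== PRECONDITION & SPEC =====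
-- Pre_ excludes exactly the inputs where Python A raises: cost shorter than price
-- (IndexError on cost[i]); A returns on every other input.
def Pre_solution (price : List Int) (cost : List Int) : Prop := price.length ≤ cost.length
instance (price : List Int) (cost : List Int) : Decidable (Pre_solution price cost) := by
  unfold Pre_solution; infer_instance
def pvWitness_solution : List Int × List Int := ([4, 8, 6], [2, 9, 1])

def Spec_solution (price : List Int) (cost : List Int) (out : Int) : Prop := out = solution_alt price cost
instance (price : List Int) (cost : List Int) (out : Int) : Decidable (Spec_solution price cost out) := by unfold Spec_solution; infer_instance

-- ===== CLAIM (what is proved, stated in full; the proofs are below) =====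
def Claim_equal_solution : Prop := ∀ (price : List Int) (cost : List Int), Dom_solution price cost → Pre_solution price cost → Spec_solution price cost (solution price cost)

-- ===== LEMMAS AND PROOFS =====

-- profit of customer i
def pvG (price cost : List Int) (i : Nat) : Int := price.getD i 0 - cost.getD i 0

-- number of customers paying at least v
def pvCnt (price : List Int) (v : Int) : Int := (price.countP (fun x => decide (v ≤ x)) : Int)

-- the money list both programs compute
def pvMoney (price cost : List Int) : List Int :=
  (List.range price.length).map (fun i => pvCnt price (price.getD i 0) * pvG price cost i)

-- first index attaining the maximum
def IsFirstArgmax (m : List Int) (j : Nat) : Prop :=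
  j < m.length ∧ (∀ i < m.length, m.getD i 0 ≤ m.getD j 0) ∧ (∀ i < j, m.getD i 0 < m.getD j 0)

lemma firstArgmax_unique {m : List Int} {j k : Nat}
    (hj : IsFirstArgmax m j) (hk : IsFirstArgmax m k) : j = k := by
  obtain ⟨hj1, hj2, hj3⟩ := hj
  obtain ⟨hk1, hk2, hk3⟩ := hk
  rcases Nat.lt_trichotomy j k with h | h | h
  · exact absurd (hj2 k hk1) (by simpa using hk3 j h)
  · exact h
  · exact absurd (hk2 j hj1) (by simpa using hj3 k h)

-- A's inner loop: the carried `final` is overwritten iff some element matches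
lemma innerLoop (v prof : Int) (l : List Int) (c f : Int) :
    l.foldl (fun (cf : Int × Int) x =>
      if v ≤ x then (cf.1 + 1, (cf.1 + 1) * prof) else cf) (c, f)
    = (c + (l.countP (fun x => decide (v ≤ x)) : Int),
       if l.countP (fun x => decide (v ≤ x)) = 0 then f
       else (c + (l.countP (fun x => decide (v ≤ x)) : Int)) * prof) := by
  induction l generalizing c f with
  | nil => simp
  | cons x t ih =>
    by_cases h : v ≤ x
    · simp only [List.foldl_cons, ih, List.countP_cons, h, decide_true]
      have hne : ¬ (t.countP (fun x => decide (v ≤ x)) + 1 : Nat) = 0 := by omega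
      simp only [if_true]
      rw [if_neg hne]
      split_ifs with h1
      · rw [Prod.ext_iff]; constructor <;> simp [h1]
      · rw [Prod.ext_iff]; constructor <;> push_cast <;> ring
    · simp only [List.foldl_cons, ih, List.countP_cons, h]
      simp

-- A's outer loop builds pvMoney
lemma outerLoop (price cost : List Int) :
    ∀ (is : List Nat), (∀ i ∈ is, i < price.length) → ∀ (acc : List Int) (f : Int),
    (is.foldl (fun (s : List Int × Int) (pri1 : Nat) =>
      let st := price.foldl (fun (cf : Int × Int) pri2 =>
        if PySem.List.pyGetD price (pri1 : Int) 0 ≤ pri2 then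
          (cf.1 + 1, (cf.1 + 1) * (PySem.List.pyGetD price (pri1 : Int) 0 - PySem.List.pyGetD cost (pri1 : Int) 0))
        else cf) ((0 : Int), s.2)
      (s.1 ++ [st.2], st.2)) (acc, f)).1
    = acc ++ is.map (fun i => pvCnt price (price.getD i 0) * pvG price cost i) := by
  intro is his
  induction is with
  | nil => intro acc f; simp
  | cons i t ih =>
    intro acc f
    have hi : i < price.length := his i (List.mem_cons_self ..)
    have hmem : price.getD i 0 ∈ price := by
      rw [List.getD_eq_getElem _ _ hi]; exact List.getElem_mem hi
    have hcnt : price.countP (fun x => decide (price.getD i 0 ≤ x)) ≠ 0 := by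
      have : 0 < price.countP (fun x => decide (price.getD i 0 ≤ x)) :=
        List.countP_pos_iff.mpr ⟨price.getD i 0, hmem, by simp⟩
      omega
    simp only [List.foldl_cons, List.map_cons]
    rw [ih (fun j hj => his j (List.mem_cons_of_mem _ hj))]
    simp only [PySem.List.pyGetD_natCast, innerLoop, if_neg hcnt]
    simp [pvCnt, pvG]

-- A's real_price accumulator is a filter
lemma realPrice_eq (price cost : List Int) :
    (List.range price.length).foldl (fun acc (i : Nat) =>
      let p := PySem.List.pyGetD price (i : Int) 0 - PySem.List.pyGetD cost (i : Int) 0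
      if p > 0 then acc ++ [p] else acc) []
    = ((List.range price.length).filter (fun i => decide (0 < pvG price cost i))).map
        (fun i => pvG price cost i) := by
  have gen : ∀ (is : List Nat) (acc : List Int),
      (is.foldl (fun acc (i : Nat) =>
        let p := PySem.List.pyGetD price (i : Int) 0 - PySem.List.pyGetD cost (i : Int) 0
        if p > 0 then acc ++ [p] else acc) acc)
      = acc ++ (is.filter (fun i => decide (0 < pvG price cost i))).map (fun i => pvG price cost i) := by
    intro is
    induction is with
    | nil => simp
    | cons i t ih =>
      intro acc
      simp only [List.foldl_cons, List.filter_cons]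
      by_cases h : 0 < pvG price cost i
      · rw [if_pos (by simpa [pvG] using h)]
        rw [ih]
        rw [if_pos (by simpa [pvG] using h)]
        simp [pvG, List.getD_eq_getElem?_getD]
      · rw [if_neg (by simpa [pvG] using h)]
        rw [ih]
        simp [h]
  simpa using gen (List.range price.length) []

-- once v is a key, the build fold never changes its value
lemma dictFold_preserve (n : Nat) (v c : Int) :
    ∀ (ps : List (Int × Int)) (d : PySem.Dict Int Int), d.get? v = some c →
    (ps.foldl (fun (d : PySem.Dict Int Int) iv =>
      if d.contains iv.2 then d else d.insert iv.2 ((n : Int) - iv.1)) d).get? v = some c := by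
  intro ps
  induction ps with
  | nil => intro d h; simpa using h
  | cons p t ih =>
    intro d h
    simp only [List.foldl_cons]
    by_cases hc : d.contains p.2
    · rw [if_pos hc]; exact ih d h
    · rw [if_neg hc]
      by_cases hv : v = p.2
      · exfalso
        rw [PySem.Dict.contains_eq_isSome_get?, ← hv, h] at hc
        simp at hc
      · exact ih _ (by rw [PySem.Dict.get?_insert_of_ne _ _ hv, h])

-- building the dict over a sorted suffix starting at absolute index s
lemma cntAux (n : Nat) (v : Int) :
    ∀ (l : List Int) (s : Int) (d : PySem.Dict Int Int),
    l.Pairwise (· ≤ ·) → v ∈ l → d.contains v = false → s + (l.length : Int) = (n : Int) →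
    ((PySem.List.enumerate l s).foldl (fun (d : PySem.Dict Int Int) iv =>
      if d.contains iv.2 then d else d.insert iv.2 ((n : Int) - iv.1)) d).get? v
      = some ((l.countP (fun x => decide (v ≤ x)) : Int)) := by
  intro l
  induction l with
  | nil => intro s d _ hv; simp at hv
  | cons x t ih =>
    intro s d hpw hv hc hs
    rw [PySem.List.enumerate_cons]
    simp only [List.foldl_cons]
    by_cases hvx : v = x
    · subst hvx
      rw [if_neg (by rw [hc]; simp)]
      have hins : (d.insert v ((n : Int) - s)).get? v = some ((n : Int) - s) :=
        PySem.Dict.get?_insert_self _ _ _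
      rw [dictFold_preserve n v _ _ _ hins]
      have hall : t.countP (fun y => decide (v ≤ y)) = t.length :=
        List.countP_eq_length.mpr (fun y hy => by
          simp only [decide_eq_true_eq]
          exact (List.pairwise_cons.mp hpw).1 y hy)
      congr 1
      simp only [List.countP_cons, decide_true, le_refl, if_pos, hall]
      simp only [List.length_cons] at hs
      push_cast at hs ⊢
      omega
    · have hvt : v ∈ t := by
        rcases List.mem_cons.mp hv with h | h
        · exact absurd h hvx
        · exact h
      have hxv : ¬ (v ≤ x) := by
        have hxle : x ≤ v := (List.pairwise_cons.mp hpw).1 v hvt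
        rcases lt_or_eq_of_le hxle with h | h
        · omega
        · exact absurd h.symm hvx
      have hcnt : (x :: t).countP (fun y => decide (v ≤ y)) = t.countP (fun y => decide (v ≤ y)) := by
        simp [hxv]
      rw [hcnt]
      have hs' : (s + 1) + (t.length : Int) = (n : Int) := by
        simp only [List.length_cons] at hs; push_cast at hs ⊢; omega
      by_cases hcx : d.contains x
      · rw [if_pos hcx]
        exact ih (s + 1) d (List.pairwise_cons.mp hpw).2 hvt hc hs'
      · rw [if_neg hcx]
        refine ih (s + 1) _ (List.pairwise_cons.mp hpw).2 hvt ?_ hs'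
        rw [PySem.Dict.contains_eq_isSome_get?, PySem.Dict.get?_insert_of_ne _ _ hvx,
          ← PySem.Dict.contains_eq_isSome_get?, hc]

-- B's dict lookup is the count of elements ≥ v
lemma cnt_getD (price : List Int) (v : Int) (hv : v ∈ price) :
    ((PySem.List.enumerate (PySem.List.sorted price (fun y => y) false) 0).foldl
        (fun (d : PySem.Dict Int Int) iv =>
          if d.contains iv.2 then d else d.insert iv.2 ((price.length : Int) - iv.1))
        PySem.Dict.empty).getD v 0 = pvCnt price v := by
  have hpw : (PySem.List.sorted price (fun y => y) false).Pairwise (· ≤ ·) := by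
    simpa using PySem.List.sorted_pairwise price (fun y => y)
  have hv' : v ∈ PySem.List.sorted price (fun y => y) false := by
    rw [PySem.List.mem_sorted]; exact hv
  have hlen : (0 : Int) + ((PySem.List.sorted price (fun y => y) false).length : Int)
      = (price.length : Int) := by
    simp [PySem.List.length_sorted]
  have h := cntAux price.length v (PySem.List.sorted price (fun y => y) false) 0
    PySem.Dict.empty hpw hv' (PySem.Dict.contains_empty _) hlen
  rw [PySem.Dict.getD_eq_get?_getD, h]
  simp [pvCnt, ((PySem.List.sorted_perm price (fun y => y) false).countP_eq _)]

-- B's scan finds the first argmax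
lemma scan_firstArgmax (m : List Int) (hm : m ≠ []) :
    ∃ j : Nat, IsFirstArgmax m j ∧
      (PySem.List.pyRange 1 (m.length : Int) 1).foldl (fun (bi : Int) i =>
        if PySem.List.pyGetD m i 0 > PySem.List.pyGetD m bi 0 then i else bi) 0 = (j : Int) := by
  have key : ∀ k : Nat, 1 ≤ k → k ≤ m.length →
      ∃ b : Nat, b < k ∧ (∀ i < k, m.getD i 0 ≤ m.getD b 0) ∧ (∀ i < b, m.getD i 0 < m.getD b 0) ∧
        (PySem.List.pyRange 1 (k : Int) 1).foldl (fun (bi : Int) i =>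
          if PySem.List.pyGetD m i 0 > PySem.List.pyGetD m bi 0 then i else bi) 0 = (b : Int) := by
    intro k
    induction k with
    | zero => exact fun h => absurd h (by norm_num)
    | succ k ihk =>
      intro _ hk
      by_cases h1 : k = 0
      · subst h1
        refine ⟨0, by omega, ?_, by omega, ?_⟩
        · intro i hi; interval_cases i; exact le_refl _
        · rw [show (((0 + 1 : Nat)) : Int) = (1 : Int) from by norm_num,
            PySem.List.pyRange_one_eq_nil (by norm_num)]
          simp
      · obtain ⟨b, hb1, hb2, hb3, hb4⟩ := ihk (by omega) (by omega)
        have hsplit : PySem.List.pyRange 1 ((k + 1 : Nat) : Int) 1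
            = PySem.List.pyRange 1 (k : Int) 1 ++ [(k : Int)] := by
          rw [show ((k + 1 : Nat) : Int) = (k : Int) + 1 from by push_cast; ring]
          exact PySem.List.pyRange_one_succ_right (by omega)
        rw [hsplit, List.foldl_append, hb4]
        simp only [List.foldl_cons, List.foldl_nil, PySem.List.pyGetD_natCast]
        by_cases hgt : m.getD k 0 > m.getD b 0
        · rw [if_pos hgt]
          refine ⟨k, by omega, ?_, ?_, rfl⟩
          · intro i hi
            by_cases hik : i = k
            · subst hik; exact le_refl _
            · exact le_trans (hb2 i (by omega)) (le_of_lt hgt)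
          · intro i hi
            exact lt_of_le_of_lt (hb2 i (by omega)) hgt
        · rw [if_neg hgt]
          refine ⟨b, by omega, ?_, hb3, rfl⟩
          intro i hi
          by_cases hik : i = k
          · subst hik; omega
          · exact hb2 i (by omega)
  obtain ⟨b, hb1, hb2, hb3, hb4⟩ := key m.length
    (by cases m with | nil => exact absurd rfl hm | cons a t => simp) (le_refl _)
  exact ⟨b, ⟨hb1, hb2, hb3⟩, hb4⟩

-- A's index-of-max is the first argmax
lemma indexMax_firstArgmax (m : List Int) (hm : m ≠ []) :
    IsFirstArgmax m ((PySem.List.index? m ((PySem.List.max? m (fun y => y)).getD 0)).getD 0) := by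
  obtain ⟨M, hM⟩ : ∃ M, PySem.List.max? m (fun y => y) = some M := by
    cases h : PySem.List.max? m (fun y => y) with
    | none => exact absurd ((PySem.List.max?_eq_none_iff m _).mp h) hm
    | some M => exact ⟨M, rfl⟩
  have hMmem : M ∈ m := PySem.List.max?_mem hM
  have hMmax : ∀ y ∈ m, y ≤ M := fun y hy => PySem.List.max?_isMax hM y hy
  obtain ⟨j, hj⟩ : ∃ j, PySem.List.index? m M = some j := by
    cases h : PySem.List.index? m M with
    | none =>
      exfalso
      have := (PySem.List.index?_isSome_iff m M).mpr hMmem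
      rw [h] at this
      simp at this
    | some j => exact ⟨j, rfl⟩
  obtain ⟨hjlt, hjv, hjfst⟩ := PySem.List.getElem_of_index?_eq_some hj
  rw [hM]
  simp only [Option.getD_some, hj]
  refine ⟨hjlt, ?_, ?_⟩
  · intro i hi
    rw [List.getD_eq_getElem _ _ hi, List.getD_eq_getElem _ _ hjlt, hjv]
    exact hMmax _ (List.getElem_mem hi)
  · intro i hi
    have hilt : i < m.length := lt_trans hi hjlt
    rw [List.getD_eq_getElem _ _ hilt, List.getD_eq_getElem _ _ hjlt, hjv]
    exact lt_of_le_of_ne (hMmax _ (List.getElem_mem hilt)) (hjfst i hi)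

-- ===== VERDICT (by name: the statement is the Claim_ definition above) =====
theorem solution_spec : Claim_equal_solution := by
  intro price cost hdom hpre
  unfold Spec_solution solution solution_alt
  simp only []
  rw [realPrice_eq price cost]
  have hprof : ((List.range price.length).map (fun (i : Nat) =>
      PySem.List.pyGetD price (i : Int) 0 - PySem.List.pyGetD cost (i : Int) 0))
      = (List.range price.length).map (fun i => pvG price cost i) := by
    simp [pvG, PySem.List.pyGetD_natCast]
  rw [hprof]
  have hcond : (((List.range price.length).filter
        (fun i => decide (0 < pvG price cost i))).map (fun i => pvG price cost i)).length = 0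
      ↔ (!(((List.range price.length).map (fun i => pvG price cost i)).any
            (fun p => decide (p > 0)))) = true := by
    simp [List.length_eq_zero_iff, List.filter_eq_nil_iff, List.any_map, List.any_eq_false]
  by_cases hc : (((List.range price.length).filter
      (fun i => decide (0 < pvG price cost i))).map (fun i => pvG price cost i)).length = 0
  · rw [if_pos hc, if_pos (hcond.mp hc)]
  · rw [if_neg hc, if_neg (fun h => hc (hcond.mpr h))]
    have hn : 0 < price.length := by
      rcases Nat.eq_zero_or_pos price.length with h | h
      · exfalso; apply hc; simp [h]
      · exact h
    -- A's money list is pvMoney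
    rw [outerLoop price cost (List.range price.length)
      (fun i hi => List.mem_range.mp hi) [] 0]
    simp only [List.nil_append]
    -- B's money list is pvMoney
    have hmoneyB : ((List.range price.length).map (fun (i : Nat) =>
        (((PySem.List.enumerate (PySem.List.sorted price (fun y => y) false) 0).foldl
          (fun (d : PySem.Dict Int Int) iv =>
            if d.contains iv.2 then d else d.insert iv.2 ((price.length : Int) - iv.1))
          PySem.Dict.empty).getD (PySem.List.pyGetD price (i : Int) 0) 0)
          * PySem.List.pyGetD ((List.range price.length).map (fun i => pvG price cost i)) (i : Int) 0))
        = pvMoney price cost := by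
      unfold pvMoney
      refine List.map_congr_left (fun i hi => ?_)
      have hilt : i < price.length := List.mem_range.mp hi
      have hmem : price.getD i 0 ∈ price := by
        rw [List.getD_eq_getElem _ _ hilt]; exact List.getElem_mem hilt
      rw [PySem.List.pyGetD_natCast, PySem.List.pyGetD_natCast, cnt_getD price _ hmem]
      congr 1
      simp [List.getD_eq_getElem?_getD, hilt]
    rw [hmoneyB]
    have hA : (List.range price.length).map
        (fun i => pvCnt price (price.getD i 0) * pvG price cost i) = pvMoney price cost := rfl
    rw [hA]
    -- both pick the first argmax of pvMoney
    have hlen : (pvMoney price cost).length = price.length := by simp [pvMoney]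
    have hne : pvMoney price cost ≠ [] := by
      intro h; rw [h] at hlen; simp at hlen; omega
    obtain ⟨j, hfa, hfold⟩ := scan_firstArgmax (pvMoney price cost) hne
    have hja := indexMax_firstArgmax (pvMoney price cost) hne
    have heq := firstArgmax_unique hja hfa
    rw [show (price.length : Int) = ((pvMoney price cost).length : Int) from by rw [hlen]]
    rw [hfold, heq]
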